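-- pv_equiv track=rewrite | github.com/Daggerbot/vogroth | tools/vdutil.py | ninja_unescape
-- ===== SOURCE A (Python) =====
-- def ninja_unescape(s):
--     out = ""
--     for c in s:
--         if c == ' ':
--             out += "\\ "
--         elif c == '$':
--             out += "\\$"
--         elif c == '\\':
--             out += "\\\\"
--         else:
--             out += c
--     return out
-- ===== SOURCE B (Python) =====
-- def ninja_unescape(s):
--     return s.replace("\\", "\\\\").replace(" ", "\\ ").replace("$", "\\$")
-- ===== Notes on version B (the rewrite author's own statement) =====
-- stated objective: idiomatic
-- what changed: Replaces the per-character branch loop with string concatenation by a chain of three str.replace scans (backslash first so escape backslashes are not re-escaped).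
import Mathlib
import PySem

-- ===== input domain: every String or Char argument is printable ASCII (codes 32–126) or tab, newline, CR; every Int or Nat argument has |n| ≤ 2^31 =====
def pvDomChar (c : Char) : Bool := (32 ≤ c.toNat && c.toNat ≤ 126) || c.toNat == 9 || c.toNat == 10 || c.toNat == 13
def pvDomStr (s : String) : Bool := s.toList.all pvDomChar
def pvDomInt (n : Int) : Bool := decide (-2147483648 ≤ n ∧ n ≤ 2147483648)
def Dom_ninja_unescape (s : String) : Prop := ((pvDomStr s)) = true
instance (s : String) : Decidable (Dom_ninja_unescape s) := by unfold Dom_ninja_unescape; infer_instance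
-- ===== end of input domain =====

-- B replaces A's per-character branch-and-append loop by three chained str.replace scans
-- (backslash first), an idiomatic rewrite; equal return value proved on all strings.

-- ===== PORT A =====
def ninja_unescape (s : String) : String :=
  s.toList.foldl
    (fun out c =>
      if c = ' ' then out ++ "\\ "
      else if c = '$' then out ++ "\\$"
      else if c = '\\' then out ++ "\\\\"
      else out ++ c.toString)
    ""

-- ===== PORT B =====
def ninja_unescape_alt (s : String) : String :=
  PySem.Str.replace (PySem.Str.replace (PySem.Str.replace s "\\" "\\\\") " " "\\ ") "$" "\\$"

-- ===== PRECONDITION & SPEC =====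
def Spec_ninja_unescape (s : String) (out : String) : Prop := out = ninja_unescape_alt s
instance (s : String) (out : String) : Decidable (Spec_ninja_unescape s out) := by unfold Spec_ninja_unescape; infer_instance

-- ===== CLAIM (what is proved, stated in full; the proofs are below) =====
def Claim_equal_ninja_unescape : Prop := ∀ (s : String), Dom_ninja_unescape s → Spec_ninja_unescape s (ninja_unescape s)

-- ===== LEMMAS AND PROOFS =====

-- the per-character escape map A implements
def pvEsc (c : Char) : List Char :=
  if c = ' ' then ['\\', ' ']
  else if c = '$' then ['\\', '$']
  else if c = '\\' then ['\\', '\\']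
  else [c]

-- single-character replace is a flatMap over the characters
theorem replace_go_single (a : Char) (new : List Char) :
    ∀ (l : List Char) (fuel : Nat) (acc : List Char), l.length ≤ fuel →
      PySem.Chars.replace.go [a] new fuel l acc
        = acc.reverse ++ l.flatMap (fun c => if c = a then new else [c]) := by
  intro l
  induction l with
  | nil =>
      intro fuel acc _
      cases fuel <;> simp [PySem.Chars.replace.go]
  | cons c t ih =>
      intro fuel acc hle
      cases fuel with
      | zero => simp at hle
      | succ n =>
          by_cases h : c = a
          · subst h
            have : List.isPrefixOf [c] (c :: t) = true := by
              simp [List.isPrefixOf]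
            rw [PySem.Chars.replace.go] ; simp [this]
            rw [ih n (new.reverse ++ acc) (by simpa using Nat.le_of_succ_le_succ hle)]
            simp
          · have : List.isPrefixOf [a] (c :: t) = false := by
              simp [List.isPrefixOf] ; exact fun hh => absurd hh.symm h
            rw [PySem.Chars.replace.go] ; simp [this]
            rw [ih n (c :: acc) (Nat.le_of_succ_le_succ hle)]
            simp [h]

theorem replace_single (a : Char) (new : List Char) (l : List Char) :
    PySem.Chars.replace l [a] new = l.flatMap (fun c => if c = a then new else [c]) := by
  unfold PySem.Chars.replace
  simp [replace_go_single a new l l.length [] (le_refl _)]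

-- characters of B's result = flatMap pvEsc
theorem alt_toList (s : String) :
    (ninja_unescape_alt s).toList = s.toList.flatMap pvEsc := by
  unfold ninja_unescape_alt
  simp only [PySem.Str.toList_replace]
  have h1 : ("\\" : String).toList = ['\\'] := by decide
  have h2 : (" " : String).toList = [' '] := by decide
  have h3 : ("$" : String).toList = ['$'] := by decide
  have h4 : ("\\\\" : String).toList = ['\\', '\\'] := by decide
  have h5 : ("\\ " : String).toList = ['\\', ' '] := by decide
  have h6 : ("\\$" : String).toList = ['\\', '$'] := by decide
  rw [h1, h2, h3, h4, h5, h6, replace_single, replace_single, replace_single]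
  induction s.toList with
  | nil => simp
  | cons c t ih =>
      simp only [List.flatMap_cons, List.flatMap_append] at *
      rw [ih]
      congr 1
      by_cases hs : c = ' '
      · subst hs ; rfl
      · by_cases hd : c = '$'
        · subst hd ; rfl
        · by_cases hb : c = '\\'
          · subst hb ; rfl
          · simp [pvEsc, hs, hd, hb]

-- characters of A's loop = flatMap pvEsc
theorem a_foldl (l : List Char) (out : String) :
    (l.foldl
      (fun out c =>
        if c = ' ' then out ++ "\\ "
        else if c = '$' then out ++ "\\$"
        else if c = '\\' then out ++ "\\\\"
        else out ++ c.toString) out).toList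
      = out.toList ++ l.flatMap pvEsc := by
  induction l generalizing out with
  | nil => simp
  | cons c t ih =>
      simp only [List.foldl_cons, List.flatMap_cons]
      rw [ih]
      by_cases hs : c = ' '
      · subst hs ; simp [pvEsc]
      · by_cases hd : c = '$'
        · subst hd ; simp [pvEsc]
        · by_cases hb : c = '\\'
          · subst hb ; simp [pvEsc]
          · simp [pvEsc, hs, hd, hb, Char.toString]

-- ===== VERDICT (by name: the statement is the Claim_ definition above) =====
theorem ninja_unescape_spec : Claim_equal_ninja_unescape := by
  intro s _
  unfold Spec_ninja_unescape ninja_unescape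
  apply String.toList_injective
  rw [a_foldl, alt_toList]
  simp
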